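-- pv_equiv track=rewrite | github.com/Shajiu/AlgorithmBook | Offer_Code/Offer_Code/FindNumbersWithSum.py | FindNumbersWithSum
-- ===== SOURCE A (Python) =====
-- def FindNumbersWithSum(array,tsum):
--     tmp=[]
--     for v in array:
--         for x in array:
--             if v+x==tsum:
--                 tmp.append((x,v))
--     if len(tmp)>0:
--         stm=[]
--         for v in tmp:
--             sum=1
--             for i in list(v):
--                 sum*=i
--             stm.append(sum)
--         p=stm
--         stm.sort()
--         t=p.index(stm[0])
--         a=list(tmp[t])
--         a.sort()
--         return a
--     else:
--         return []
-- ===== SOURCE B (Python) =====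
-- def FindNumbersWithSum(array, tsum):
--     s = set(array)
--     for v in array:
--         w = tsum - v
--         if w in s:
--             return [v, w] if v <= w else [w, v]
--     return []
-- ===== Notes on version B (the rewrite author's own statement) =====
-- stated objective: faster
-- what changed: A builds all O(n^2) sum-pairs, maps them to products, sorts, and (due to p=stm aliasing) always picks the first pair; B does one pass with a hash set, returning the sorted pair for the first v with tsum-v present, which is exactly A's result.
import Mathlib
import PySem

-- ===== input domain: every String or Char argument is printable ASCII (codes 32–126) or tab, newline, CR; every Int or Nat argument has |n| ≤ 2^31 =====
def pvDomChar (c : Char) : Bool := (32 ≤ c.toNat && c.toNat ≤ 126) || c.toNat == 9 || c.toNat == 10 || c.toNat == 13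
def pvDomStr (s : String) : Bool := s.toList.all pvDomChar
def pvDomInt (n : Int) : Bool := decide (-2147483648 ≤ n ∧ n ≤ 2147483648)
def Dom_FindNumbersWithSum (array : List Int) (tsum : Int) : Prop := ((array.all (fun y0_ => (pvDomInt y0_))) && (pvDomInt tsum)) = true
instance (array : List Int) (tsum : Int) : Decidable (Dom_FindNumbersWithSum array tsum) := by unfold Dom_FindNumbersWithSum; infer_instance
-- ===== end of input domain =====

-- B replaces A's quadratic pair enumeration (plus sort) by a single pass with a hash set; equal output proved below.


-- ===== PORT A =====
-- literal transliteration of A; the `.getD` defaults are unreachable: in the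
-- 'tmp.length > 0' branch tmp, stm and the sorted list are nonempty, stm[0] is
-- a member of the sorted list, and t is a valid index of tmp.
def FindNumbersWithSum (array : List Int) (tsum : Int) : List Int :=
  let tmp : List (Int × Int) :=
    array.foldl (fun acc v =>
      array.foldl (fun acc2 x => if v + x == tsum then acc2 ++ [(x, v)] else acc2) acc) []
  if tmp.length > 0 then
    let stm : List Int :=
      tmp.foldl (fun acc v => acc ++ [[v.1, v.2].foldl (fun s i => s * i) 1]) []
    -- p = stm; stm.sort() : in Python p and stm alias the SAME list, so after the
    -- sort p IS the sorted list; t = p.index(stm[0])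
    let stmS := PySem.List.sorted stm (fun x => x) false
    let t : Nat := (PySem.List.index? stmS ((PySem.List.pyGet? stmS 0).getD 0)).getD 0
    let a := (PySem.List.pyGet? tmp (t : Int)).getD (0, 0)
    PySem.List.sorted [a.1, a.2] (fun x => x) false
  else []

-- ===== PORT B =====
def pvScan (s : PySem.Set Int) (tsum : Int) : List Int → List Int
  | [] => []
  | v :: rest =>
    let w := tsum - v
    if PySem.Set.contains s w then (if v ≤ w then [v, w] else [w, v])
    else pvScan s tsum rest

def FindNumbersWithSum_alt (array : List Int) (tsum : Int) : List Int :=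
  pvScan (PySem.Set.ofList array) tsum array

-- ===== PRECONDITION & SPEC =====
def Spec_FindNumbersWithSum (array : List Int) (tsum : Int) (out : List Int) : Prop := out = FindNumbersWithSum_alt array tsum
instance (array : List Int) (tsum : Int) (out : List Int) : Decidable (Spec_FindNumbersWithSum array tsum out) := by unfold Spec_FindNumbersWithSum; infer_instance

-- ===== CLAIM (what is proved, stated in full; the proofs are below) =====
def Claim_equal_FindNumbersWithSum : Prop := ∀ (array : List Int) (tsum : Int), Dom_FindNumbersWithSum array tsum → Spec_FindNumbersWithSum array tsum (FindNumbersWithSum array tsum)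

-- ===== LEMMAS AND PROOFS =====

-- the pairs A's inner loop appends for a given outer element v
def pvPairs (array : List Int) (tsum v : Int) : List (Int × Int) :=
  (array.filter (fun x => v + x == tsum)).map (fun x => (x, v))

lemma pvFilter_eq (array : List Int) (tsum v : Int) :
    array.filter (fun x => v + x == tsum) = array.filter (fun x => x == tsum - v) := by
  apply List.filter_congr
  intro x _
  rw [Bool.eq_iff_iff]
  simp only [beq_iff_eq]
  omega

lemma sorted_pair (a b : Int) :
    PySem.List.sorted [a, b] (fun x => x) false = if a ≤ b then [a, b] else [b, a] := by
  split_ifs with h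
  · exact PySem.List.sorted_id_eq_of_perm_of_pairwise _ _ (List.Perm.refl _) (by simp [h])
  · exact PySem.List.sorted_id_eq_of_perm_of_pairwise _ _
      (List.Perm.swap b a []).symm (by simp; omega)

-- A's result as a function of tmp's head
lemma pvTail_eq (tmp : List (Int × Int)) (p : Int × Int) (rest : List (Int × Int))
    (h : tmp = p :: rest) :
    (if tmp.length > 0 then
      let stm : List Int :=
        tmp.foldl (fun acc v => acc ++ [[v.1, v.2].foldl (fun s i => s * i) 1]) []
      let stmS := PySem.List.sorted stm (fun x => x) false
      let t : Nat := (PySem.List.index? stmS ((PySem.List.pyGet? stmS 0).getD 0)).getD 0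
      let a := (PySem.List.pyGet? tmp (t : Int)).getD (0, 0)
      PySem.List.sorted [a.1, a.2] (fun x => x) false
    else []) = PySem.List.sorted [p.1, p.2] (fun x => x) false := by
  subst h
  have hlen : (p :: rest).length > 0 := by simp
  rw [if_pos hlen]
  have hstm : (p :: rest).foldl (fun acc v => acc ++ [[v.1, v.2].foldl (fun s i => s * i) 1]) []
      = (p :: rest).map (fun v => [v.1, v.2].foldl (fun s i => s * i) 1) := by
    have := PySem.List.foldl_append_singleton_eq_map
      (l := p :: rest) (f := fun v : Int × Int => [v.1, v.2].foldl (fun s i => s * i) 1)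
      (acc := ([] : List Int))
    simpa only [List.nil_append] using this
  simp only [hstm]
  -- the sorted product list is nonempty: name its head
  have hne : PySem.List.sorted ((p :: rest).map (fun v => [v.1, v.2].foldl (fun s i => s * i) 1))
      (fun x => x) false ≠ [] := by
    intro hnil
    rw [PySem.List.sorted_eq_nil_iff] at hnil
    simp at hnil
  obtain ⟨h0, tl, hS⟩ : ∃ h0 tl, PySem.List.sorted ((p :: rest).map
      (fun v => [v.1, v.2].foldl (fun s i => s * i) 1)) (fun x => x) false = h0 :: tl := by
    cases hc : PySem.List.sorted ((p :: rest).map (fun v => [v.1, v.2].foldl (fun s i => s * i) 1))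
        (fun x => x) false with
    | nil => exact absurd hc hne
    | cons a b => exact ⟨a, b, rfl⟩
  simp only [hS, PySem.List.pyGet?_zero_cons, Option.getD_some, PySem.List.index?_cons_self]
  simp

-- one outer-loop step of A's tmp list: the inner loop appends pvPairs
lemma pvTmp_eq (array : List Int) (tsum : Int) (l : List Int) :
    l.foldl (fun acc v =>
      array.foldl (fun acc2 x => if v + x == tsum then acc2 ++ [(x, v)] else acc2) acc) []
    = l.flatMap (pvPairs array tsum) := by
  have h : ∀ (acc : List (Int × Int)),
      l.foldl (fun acc v =>
        array.foldl (fun acc2 x => if v + x == tsum then acc2 ++ [(x, v)] else acc2) acc) acc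
      = acc ++ l.flatMap (pvPairs array tsum) := by
    induction l with
    | nil => intro acc; simp
    | cons v rest ih =>
      intro acc
      simp only [List.foldl_cons, List.flatMap_cons]
      rw [PySem.List.foldl_append_if (p := fun x => v + x == tsum) (f := fun x => (x, v)), ih]
      simp [pvPairs]
  simpa using h []

-- head of pvPairs when tsum - v occurs in array
lemma pvPairs_mem (array : List Int) (tsum v : Int) (hmem : (tsum - v) ∈ array) :
    ∃ rest, pvPairs array tsum v = (tsum - v, v) :: rest := by
  unfold pvPairs
  rw [pvFilter_eq]
  cases hc : array.filter (fun x => x == tsum - v) with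
  | nil =>
    rw [List.filter_eq_nil_iff] at hc
    exact absurd (beq_self_eq_true (tsum - v)) (hc _ hmem)
  | cons x t =>
    have hx : x ∈ array.filter (fun x => x == tsum - v) := by rw [hc]; exact List.mem_cons_self
    have : x = tsum - v := by simpa using (List.of_mem_filter hx)
    subst this
    exact ⟨t.map (fun x => (x, v)), by simp⟩

lemma pvPairs_not_mem (array : List Int) (tsum v : Int) (hmem : (tsum - v) ∉ array) :
    pvPairs array tsum v = [] := by
  unfold pvPairs
  rw [pvFilter_eq]
  rw [List.filter_eq_nil_iff.mpr]
  · simp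
  · intro x hx
    simp only [beq_iff_eq]
    intro h; exact hmem (h ▸ hx)

-- main induction: A's post-processing of tmp over prefix l equals B's scan of l
lemma pvMain (array : List Int) (tsum : Int) (l : List Int) :
    (match l.flatMap (pvPairs array tsum) with
     | [] => ([] : List Int)
     | p :: _ => PySem.List.sorted [p.1, p.2] (fun x => x) false)
    = pvScan (PySem.Set.ofList array) tsum l := by
  induction l with
  | nil => simp [pvScan]
  | cons v rest ih =>
    simp only [List.flatMap_cons, pvScan]
    by_cases hmem : (tsum - v) ∈ array
    · obtain ⟨r, hr⟩ := pvPairs_mem array tsum v hmem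
      have hcont : PySem.Set.contains (PySem.Set.ofList array) (tsum - v) = true := by
        rw [PySem.Set.contains_iff, PySem.Set.mem_ofList]; exact hmem
      rw [hr]
      simp only [List.cons_append, hcont, if_true]
      rw [sorted_pair]
      by_cases hle : tsum - v ≤ v
      · rw [if_pos hle]
        by_cases h2 : v ≤ tsum - v
        · rw [if_pos h2]
          have hv : tsum - v = v := by omega
          rw [hv]
        · rw [if_neg h2]
      · rw [if_neg hle, if_pos (by omega)]
    · have hcont : PySem.Set.contains (PySem.Set.ofList array) (tsum - v) = false := by
        rw [Bool.eq_false_iff]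
        intro hc
        rw [PySem.Set.contains_iff, PySem.Set.mem_ofList] at hc
        exact hmem hc
      rw [pvPairs_not_mem array tsum v hmem, hcont]
      simpa using ih

-- ===== VERDICT (by name: the statement is the Claim_ definition above) =====
theorem FindNumbersWithSum_spec : Claim_equal_FindNumbersWithSum := by
  intro array tsum _
  unfold Spec_FindNumbersWithSum FindNumbersWithSum FindNumbersWithSum_alt
  rw [pvTmp_eq array tsum array, ← pvMain array tsum array]
  cases hc : array.flatMap (pvPairs array tsum) with
  | nil => simp
  | cons p rest => simpa using pvTail_eq (p :: rest) p rest rfl
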